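-- pv_equiv track=rewrite | github.com/danigrim/HackathonCCR-SeuBrequim | bot/app.py | find_requests
-- ===== SOURCE A (Python) =====
-- def find_requests(msg_arr):
--     dici = {}
--     dici['eat'] = {'comer', 'comida', 'fome', 'food', 'jantar', 'almoco', 'almoço', 'lanche', 'lanchar', 'lanchinho', 'comidinha', 'rango', 'alimentacao', 'come'}
--     dici['sleep'] = {'sono', 'dormir', 'descansar', 'sleep', 'deitar', 'parar', 'dormidinha', 'soneca', 'cama'}
--     dici['bathroom'] = {'banheiro', 'mijar', 'banho', 'limpar', 'lavar'}
--     dici['help'] = {'ajuda', 'sos', 'suporte', 'socorro', 'acidente', 'perigo', 'seguranca', 'atendimento'}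
--     match_lst = []
--     for key,value in dici.items():
--         for word in msg_arr:
--             if word in value:
--                 match_lst.append(str(word))
--     return match_lst
-- ===== SOURCE B (Python) =====
-- # Inverted keyword->category index built once; single pass over the message into
-- # four ordered buckets, concatenated in category order.
-- CATEGORIES = [
--     ('eat', ['comer', 'comida', 'fome', 'food', 'jantar', 'almoco', 'almoço', 'lanche', 'lanchar', 'lanchinho', 'comidinha', 'rango', 'alimentacao', 'come']),
--     ('sleep', ['sono', 'dormir', 'descansar', 'sleep', 'deitar', 'parar', 'dormidinha', 'soneca', 'cama']),
--     ('bathroom', ['banheiro', 'mijar', 'banho', 'limpar', 'lavar']),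
--     ('help', ['ajuda', 'sos', 'suporte', 'socorro', 'acidente', 'perigo', 'seguranca', 'atendimento']),
-- ]
--
-- KEYWORD_TO_CATEGORY = {kw: name for name, kws in CATEGORIES for kw in kws}
--
-- def find_requests(msg_arr):
--     eat, sleep, bathroom, help_ = [], [], [], []
--     for word in msg_arr:
--         cat = KEYWORD_TO_CATEGORY.get(word)
--         if cat == 'eat':
--             eat.append(str(word))
--         elif cat == 'sleep':
--             sleep.append(str(word))
--         elif cat == 'bathroom':
--             bathroom.append(str(word))
--         elif cat == 'help':
--             help_.append(str(word))
--     return eat + sleep + bathroom + help_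
-- ===== Notes on version B (the rewrite author's own statement) =====
-- stated objective: alternative
-- what changed: A scans the whole message once per category (4 passes, set membership per word per category); B builds one inverted keyword-to-category index and makes a single pass over the message, appending each word to its category bucket, then concatenates the buckets in category order.
import Mathlib
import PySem

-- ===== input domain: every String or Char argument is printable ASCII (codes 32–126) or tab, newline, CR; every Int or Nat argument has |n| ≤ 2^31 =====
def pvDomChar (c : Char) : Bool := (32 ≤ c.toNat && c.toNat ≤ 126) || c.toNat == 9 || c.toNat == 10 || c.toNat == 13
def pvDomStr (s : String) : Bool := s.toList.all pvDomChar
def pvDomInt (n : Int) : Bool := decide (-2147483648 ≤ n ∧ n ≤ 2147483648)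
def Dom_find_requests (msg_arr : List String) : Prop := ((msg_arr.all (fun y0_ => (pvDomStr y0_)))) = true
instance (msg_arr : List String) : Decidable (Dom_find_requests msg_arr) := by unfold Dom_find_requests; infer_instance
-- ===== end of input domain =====

-- B replaces A's four category passes over the message by one inverted keyword->category
-- index and a single pass into four buckets concatenated in category order.

-- the four keyword sets of the source module (shared literal data of both programs)
def kwEat : List String := ["comer", "comida", "fome", "food", "jantar", "almoco", "almoço", "lanche", "lanchar", "lanchinho", "comidinha", "rango", "alimentacao", "come"]
def kwSleep : List String := ["sono", "dormir", "descansar", "sleep", "deitar", "parar", "dormidinha", "soneca", "cama"]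
def kwBath : List String := ["banheiro", "mijar", "banho", "limpar", "lavar"]
def kwHelp : List String := ["ajuda", "sos", "suporte", "socorro", "acidente", "perigo", "seguranca", "atendimento"]

-- ===== PORT A =====
def find_requests (msg_arr : List String) : List String :=
  let dici : PySem.Dict String (PySem.Set String) :=
    ((((PySem.Dict.empty).insert "eat" (PySem.Set.ofList kwEat)).insert "sleep"
        (PySem.Set.ofList kwSleep)).insert "bathroom"
        (PySem.Set.ofList kwBath)).insert "help" (PySem.Set.ofList kwHelp)
  dici.items.foldl
    (fun match_lst kv =>
      msg_arr.foldl (fun acc word => if kv.2.contains word then acc ++ [word] else acc) match_lst)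
    []

-- ===== PORT B =====
-- the dict comprehension {kw: name for name, kws in CATEGORIES for kw in kws}: all 36 keys
-- are distinct literals, so the resulting dict is exactly this literal association list
def invIndex : PySem.Dict String String :=
  PySem.Dict.mk (kwEat.map (fun k => (k, "eat")) ++ kwSleep.map (fun k => (k, "sleep"))
    ++ kwBath.map (fun k => (k, "bathroom")) ++ kwHelp.map (fun k => (k, "help")))

-- loop body of B: cat = KEYWORD_TO_CATEGORY.get(word); if/elif append to one bucket
def bstep (acc : List String × List String × List String × List String) (word : String) :
    List String × List String × List String × List String :=
  let cat := invIndex.get? word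
  if cat == some "eat" then (acc.1 ++ [word], acc.2.1, acc.2.2.1, acc.2.2.2)
  else if cat == some "sleep" then (acc.1, acc.2.1 ++ [word], acc.2.2.1, acc.2.2.2)
  else if cat == some "bathroom" then (acc.1, acc.2.1, acc.2.2.1 ++ [word], acc.2.2.2)
  else if cat == some "help" then (acc.1, acc.2.1, acc.2.2.1, acc.2.2.2 ++ [word])
  else acc

def find_requests_alt (msg_arr : List String) : List String :=
  let r := msg_arr.foldl bstep ([], [], [], [])
  r.1 ++ r.2.1 ++ r.2.2.1 ++ r.2.2.2

-- ===== PRECONDITION & SPEC =====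
def Spec_find_requests (msg_arr : List String) (out : List String) : Prop := out = find_requests_alt msg_arr
instance (msg_arr : List String) (out : List String) : Decidable (Spec_find_requests msg_arr out) := by unfold Spec_find_requests; infer_instance

-- ===== CLAIM (what is proved, stated in full; the proofs are below) =====
def Claim_equal_find_requests : Prop := ∀ (msg_arr : List String), Dom_find_requests msg_arr → Spec_find_requests msg_arr (find_requests msg_arr)

-- ===== LEMMAS AND PROOFS =====

-- lookup in a Dict literal whose prefix maps every key of ks to the same category c
theorem get?_mk_map_const (ks : List String) (c : String) (rest : List (String × String)) (w : String) :
    (PySem.Dict.mk (ks.map (fun k => (k, c)) ++ rest)).get? w =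
      if w ∈ ks then some c else (PySem.Dict.mk rest).get? w := by
  induction ks with
  | nil => simp
  | cons k ks ih =>
      by_cases h : k = w
      · subst h; simp [PySem.Dict.get?_mk_cons]
      · have h' : ¬ w = k := fun hw => h hw.symm
        simp [PySem.Dict.get?_mk_cons, h, ih, List.mem_cons, h']

theorem invIndex_get? (w : String) :
    invIndex.get? w =
      if w ∈ kwEat then some "eat" else if w ∈ kwSleep then some "sleep"
      else if w ∈ kwBath then some "bathroom" else if w ∈ kwHelp then some "help" else none := by
  have hlast := get?_mk_map_const kwHelp "help" [] w
  rw [List.append_nil] at hlast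
  have h0 : (PySem.Dict.mk ([] : List (String × String))).get? w = none := by
    simp [PySem.Dict.get?]
  rw [h0] at hlast
  simp only [invIndex, List.append_assoc, get?_mk_map_const, hlast]

theorem contains_ofList_eq (l : List String) (w : String) :
    (PySem.Set.ofList l).contains w = decide (w ∈ l) := by
  by_cases h : w ∈ l
  · simp [h]
  · simp [h]


-- the four keyword sets are pairwise disjoint
theorem disj_es : ∀ x ∈ kwEat, x ∉ kwSleep := by decide
theorem disj_eb : ∀ x ∈ kwEat, x ∉ kwBath := by decide
theorem disj_eh : ∀ x ∈ kwEat, x ∉ kwHelp := by decide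
theorem disj_sb : ∀ x ∈ kwSleep, x ∉ kwBath := by decide
theorem disj_sh : ∀ x ∈ kwSleep, x ∉ kwHelp := by decide
theorem disj_bh : ∀ x ∈ kwBath, x ∉ kwHelp := by decide

theorem cond_eat (w : String) :
    (invIndex.get? w == some "eat") = (PySem.Set.ofList kwEat).contains w := by
  rw [invIndex_get?, contains_ofList_eq]
  by_cases h1 : w ∈ kwEat
  · simp [h1]
  · simp only [h1, if_false]
    split_ifs <;> rfl

theorem cond_sleep (w : String) :
    (invIndex.get? w == some "sleep") = (PySem.Set.ofList kwSleep).contains w := by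
  rw [invIndex_get?, contains_ofList_eq]
  by_cases h1 : w ∈ kwEat
  · simp [h1, decide_eq_false (disj_es w h1)]
  · by_cases h2 : w ∈ kwSleep
    · simp [h1, h2]
    · simp only [h1, h2, if_false]
      split_ifs <;> rfl

theorem cond_bath (w : String) :
    (invIndex.get? w == some "bathroom") = (PySem.Set.ofList kwBath).contains w := by
  rw [invIndex_get?, contains_ofList_eq]
  by_cases h1 : w ∈ kwEat
  · simp [h1, decide_eq_false (disj_eb w h1)]
  · by_cases h2 : w ∈ kwSleep
    · simp [h1, h2, decide_eq_false (disj_sb w h2)]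
    · by_cases h3 : w ∈ kwBath
      · simp [h1, h2, h3]
      · simp only [h1, h2, h3, if_false]
        split_ifs <;> rfl

theorem cond_help (w : String) :
    (invIndex.get? w == some "help") = (PySem.Set.ofList kwHelp).contains w := by
  rw [invIndex_get?, contains_ofList_eq]
  by_cases h1 : w ∈ kwEat
  · simp [h1, decide_eq_false (disj_eh w h1)]
  · by_cases h2 : w ∈ kwSleep
    · simp [h1, h2, decide_eq_false (disj_sh w h2)]
    · by_cases h3 : w ∈ kwBath
      · simp [h1, h2, h3, decide_eq_false (disj_bh w h3)]
      · by_cases h4 : w ∈ kwHelp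
        · simp [h1, h2, h3, h4]
        · simp [h1, h2, h3, h4]

-- B's single pass distributes the message into the four buckets, in message order
theorem bstep_foldl (msg : List String) (e s b h : List String) :
    msg.foldl bstep (e, s, b, h) =
      (e ++ msg.filter (fun w => invIndex.get? w == some "eat"),
       s ++ msg.filter (fun w => invIndex.get? w == some "sleep"),
       b ++ msg.filter (fun w => invIndex.get? w == some "bathroom"),
       h ++ msg.filter (fun w => invIndex.get? w == some "help")) := by
  induction msg generalizing e s b h with
  | nil => simp
  | cons w msg ih =>
      cases hcat : invIndex.get? w with
      | none =>
          have hb : bstep (e, s, b, h) w = (e, s, b, h) := by simp [bstep, hcat]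
          rw [List.foldl_cons, hb, ih]
          simp [hcat]
      | some c =>
          by_cases h1 : c = "eat"
          · subst h1
            have hb : bstep (e, s, b, h) w = (e ++ [w], s, b, h) := by simp [bstep, hcat]
            rw [List.foldl_cons, hb, ih]
            simp [hcat, List.append_assoc]
          · by_cases h2 : c = "sleep"
            · subst h2
              have hb : bstep (e, s, b, h) w = (e, s ++ [w], b, h) := by simp [bstep, hcat]
              rw [List.foldl_cons, hb, ih]
              simp [hcat, List.append_assoc]
            · by_cases h3 : c = "bathroom"
              · subst h3
                have hb : bstep (e, s, b, h) w = (e, s, b ++ [w], h) := by simp [bstep, hcat]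
                rw [List.foldl_cons, hb, ih]
                simp [hcat, List.append_assoc]
              · by_cases h4 : c = "help"
                · subst h4
                  have hb : bstep (e, s, b, h) w = (e, s, b, h ++ [w]) := by simp [bstep, hcat]
                  rw [List.foldl_cons, hb, ih]
                  simp [hcat, List.append_assoc]
                · have hb : bstep (e, s, b, h) w = (e, s, b, h) := by
                    simp [bstep, hcat, h1, h2, h3, h4]
                  rw [List.foldl_cons, hb, ih]
                  simp [hcat, h1, h2, h3, h4]

theorem A_eq (msg : List String) :
    find_requests msg =
      msg.filter (fun w => (PySem.Set.ofList kwEat).contains w)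
        ++ msg.filter (fun w => (PySem.Set.ofList kwSleep).contains w)
        ++ msg.filter (fun w => (PySem.Set.ofList kwBath).contains w)
        ++ msg.filter (fun w => (PySem.Set.ofList kwHelp).contains w) := by
  unfold find_requests
  dsimp only
  rw [show (((((PySem.Dict.empty).insert "eat" (PySem.Set.ofList kwEat)).insert "sleep"
        (PySem.Set.ofList kwSleep)).insert "bathroom"
        (PySem.Set.ofList kwBath)).insert "help" (PySem.Set.ofList kwHelp)).items =
      [("eat", PySem.Set.ofList kwEat), ("sleep", PySem.Set.ofList kwSleep),
       ("bathroom", PySem.Set.ofList kwBath), ("help", PySem.Set.ofList kwHelp)] from rfl]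
  simp only [List.foldl_cons, List.foldl_nil]
  rw [PySem.List.foldl_append_if (f := fun w => w), PySem.List.foldl_append_if (f := fun w => w),
      PySem.List.foldl_append_if (f := fun w => w), PySem.List.foldl_append_if (f := fun w => w)]
  have he : ∀ l : List String, (PySem.Set.ofList l).contains = fun w => decide (w ∈ l) :=
    fun l => funext (contains_ofList_eq l)
  simp [List.append_assoc, he]

theorem B_eq (msg : List String) :
    find_requests_alt msg =
      msg.filter (fun w => (PySem.Set.ofList kwEat).contains w)
        ++ msg.filter (fun w => (PySem.Set.ofList kwSleep).contains w)
        ++ msg.filter (fun w => (PySem.Set.ofList kwBath).contains w)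
        ++ msg.filter (fun w => (PySem.Set.ofList kwHelp).contains w) := by
  unfold find_requests_alt
  rw [bstep_foldl]
  simp only [List.nil_append, List.append_assoc]
  rw [funext cond_eat, funext cond_sleep, funext cond_bath, funext cond_help]

-- ===== VERDICT (by name: the statement is the Claim_ definition above) =====
theorem find_requests_spec : Claim_equal_find_requests := by
  intro msg_arr _
  unfold Spec_find_requests
  rw [A_eq, B_eq]
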